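-- pv_equiv track=rewrite | github.com/jsg921019/algorithm_study | stack/괄호의_값.py | f
-- ===== SOURCE A (Python) =====
-- def f(s):
--   if s=='':
--     return 1
--   p,q=0,0
--   for i in range(len(s)-1):
--     if s[i]=='(':
--       p+=1
--     elif s[i]==')':
--       p-=1
--     elif s[i]=='[':
--       q+=1
--     else:
--       q-=1
--     if p==q==0:
--       a=f(s[:i+1])
--       b=f(s[i+1:])
--       if a and b:
--         return a+b
--       else:
--         return 0
--   if s[0]=='(' and s[-1]==')':
--     return 2*f(s[1:-1])
--   elif s[0]=='[' and s[-1]==']':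
--     return 3*f(s[1:-1])
--   return 0
-- ===== SOURCE B (Python) =====
-- def f(s):
--     if s == '':
--         return 1
--     total = 0
--     stack = []  # (open_char, accumulated_sum_inside), top at end
--     for c in s:
--         if c == '(' or c == '[':
--             stack.append((c, 0))
--         elif c == ')' or c == ']':
--             if not stack:
--                 return 0
--             o, v = stack.pop()
--             if o != ('(' if c == ')' else '['):
--                 return 0
--             add = (2 if v == 0 else 2 * v) if c == ')' else (3 if v == 0 else 3 * v)
--             if stack:
--                 oc, ov = stack.pop()
--                 stack.append((oc, ov + add))
--             else:
--                 total += add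
--         else:
--             return 0
--     if stack:
--         return 0
--     return total
-- ===== Notes on version B (the rewrite author's own statement) =====
-- stated objective: faster
-- what changed: A recursively re-scans the string for a balanced split point and recurses on slices (quadratic re-scanning plus slice copying); B is a single left-to-right pass over the characters maintaining a stack of (open bracket, accumulated inner sum) pairs, returning 0 on any mismatch, underflow, foreign character or leftover open bracket.
import Mathlib
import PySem

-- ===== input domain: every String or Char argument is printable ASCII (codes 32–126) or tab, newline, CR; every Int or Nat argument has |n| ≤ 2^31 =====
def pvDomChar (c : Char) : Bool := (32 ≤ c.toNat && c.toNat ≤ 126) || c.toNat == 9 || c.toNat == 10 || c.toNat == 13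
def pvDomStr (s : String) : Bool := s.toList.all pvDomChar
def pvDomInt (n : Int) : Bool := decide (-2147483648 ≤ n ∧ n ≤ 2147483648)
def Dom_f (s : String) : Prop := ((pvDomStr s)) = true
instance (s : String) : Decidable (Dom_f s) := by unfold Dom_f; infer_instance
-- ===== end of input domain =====

-- B replaces A's recursive split-point re-scanning by a single pass with a stack of
-- (open bracket, accumulated inner sum) pairs (objective: faster, O(n) vs O(n^2)).

-- ===== PORT A =====
-- A works on the string's characters; ported over List Char (s.toList), slices as take/drop.
mutual
def fA (s : List Char) : Int :=
  if s = [] then 1 else loopA s 0 0 0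
termination_by (s.length, s.length + 1)
decreasing_by all_goals simp_wf <;> omega

def loopA (s : List Char) (i : Nat) (p q : Int) : Int :=
  if h : i < s.length - 1 then
    let c := s.getD i ' '
    let p' : Int := if c = '(' then p + 1 else if c = ')' then p - 1 else p
    let q' : Int := if c = '(' then q else if c = ')' then q
                    else if c = '[' then q + 1 else q - 1
    if p' = 0 ∧ q' = 0 then
      let a := fA (s.take (i+1))
      let b := fA (s.drop (i+1))
      if a ≠ 0 ∧ b ≠ 0 then a + b else 0
    else loopA s (i+1) p' q'
  else
    -- loop finished without a balanced split point: the wrapper checks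
    match s with
    | [] => 0  -- unreachable: fA enters the loop only with s ≠ []
    | c :: rest =>
      if c = '(' ∧ (c :: rest).getLast? = some ')' then 2 * fA rest.dropLast
      else if c = '[' ∧ (c :: rest).getLast? = some ']' then 3 * fA rest.dropLast
      else 0
termination_by (s.length, s.length - i)
decreasing_by all_goals simp_wf <;> omega
end

def f (s : String) : Int := fA s.toList

-- ===== PORT B =====
-- state: (total accumulated at top level, stack of (open bracket, sum accumulated inside it))
def stepB (st : Int × List (Char × Int)) (c : Char) : Option (Int × List (Char × Int)) :=
  if c = '(' ∨ c = '[' then some (st.1, (c, 0) :: st.2)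
  else if c = ')' ∨ c = ']' then
    match st.2 with
    | [] => none
    | (o, v) :: rest =>
      if o ≠ (if c = ')' then '(' else '[') then none
      else
        let add : Int := if c = ')' then (if v = 0 then 2 else 2 * v)
                         else (if v = 0 then 3 else 3 * v)
        match rest with
        | [] => some (st.1 + add, [])
        | (oc, ov) :: rest2 => some (st.1, (oc, ov + add) :: rest2)
  else none

def runB (st : Int × List (Char × Int)) : List Char → Option (Int × List (Char × Int))
  | [] => some st
  | c :: cs =>
    match stepB st c with
    | none => none
    | some st' => runB st' cs

def fAltL (l : List Char) : Int :=
  if l = [] then 1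
  else
    match runB (0, []) l with
    | some (t, []) => t
    | _ => 0

def f_alt (s : String) : Int := fAltL s.toList

-- ===== PRECONDITION & SPEC =====
def Spec_f (s : String) (out : Int) : Prop := out = f_alt s
instance (s : String) (out : Int) : Decidable (Spec_f s out) := by unfold Spec_f; infer_instance

-- ===== CLAIM (what is proved, stated in full; the proofs are below) =====
def Claim_equal_f : Prop := ∀ (s : String), Dom_f s → Spec_f s (f s)

-- ===== LEMMAS AND PROOFS =====

-- A's prefix counters: p counts '(' minus ')', q counts '[' minus every other character
def pcnt (u : List Char) : Int := (u.count '(' : Int) - (u.count ')' : Int)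
def qcnt (u : List Char) : Int :=
  (u.count '[' : Int) - (u.countP (fun c => ¬(c = '(' ∨ c = ')' ∨ c = '[')) : Int)

theorem runB_append (u v : List Char) (st : Int × List (Char × Int)) :
    runB st (u ++ v) = match runB st u with
      | none => none
      | some st' => runB st' v := by
  induction u generalizing st with
  | nil => simp [runB]
  | cons c cs ih =>
    simp only [List.cons_append, runB]
    cases stepB st c with
    | none => rfl
    | some st' => exact ih st'

theorem stepB_shift (b : Int) (os : List (Char × Int)) (c : Char) :
    stepB (b, os) c = (stepB (0, os) c).map (fun st => (b + st.1, st.2)) := by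
  unfold stepB
  by_cases h1 : c = '(' ∨ c = '['
  · simp [h1]
  · simp only [h1, if_false]
    by_cases h2 : c = ')' ∨ c = ']'
    · simp only [h2, if_true]
      match os with
      | [] => rfl
      | (o, v) :: rest =>
        by_cases h3 : o = (if c = ')' then '(' else '[')
        · simp only [h3, ne_eq, not_true_eq_false, if_false]
          match rest with
          | [] => simp
          | (oc, ov) :: rest2 => simp
        · simp [h3]
    · simp [h2]

theorem runB_shift (u : List Char) (b : Int) (os : List (Char × Int)) :
    runB (b, os) u = (runB (0, os) u).map (fun st => (b + st.1, st.2)) := by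
  induction u generalizing b os with
  | nil => simp [runB]
  | cons c cs ih =>
    simp only [runB, stepB_shift b os c]
    cases h : stepB (0, os) c with
    | none => rfl
    | some st' =>
      simp only [Option.map_some]
      rw [ih (b + st'.1) st'.2, ih st'.1 st'.2]
      cases h2 : runB (0, st'.2) cs <;> simp [add_assoc]

theorem stepB_frame (c : Char) (os : List (Char × Int)) (st : Int × List (Char × Int))
    (h : stepB (0, os) c = some st) (b : Int) (d : Char × Int) (ext : List (Char × Int)) :
    stepB (b, os ++ d :: ext) c = some (b, st.2 ++ (d.1, d.2 + st.1) :: ext) := by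
  unfold stepB at h ⊢
  by_cases h1 : c = '(' ∨ c = '['
  · simp only [h1, if_true, Option.some_inj] at h ⊢
    subst h; simp
  · simp only [h1, if_false] at h ⊢
    by_cases h2 : c = ')' ∨ c = ']'
    · simp only [h2, if_true] at h ⊢
      match os with
      | [] => simp at h
      | (o, v) :: os3 =>
        by_cases h3 : o = (if c = ')' then '(' else '[')
        · simp only [h3, ne_eq, not_true_eq_false, if_false, List.cons_append] at h ⊢
          match os3 with
          | [] =>
            simp only [Option.some_inj] at h
            subst h; simp
          | (oc, ov) :: os4 =>
            simp only [Option.some_inj] at h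
            subst h; simp
        · simp [h3] at h
    · simp [h2] at h

-- frame: a run that succeeds over stack os never touches anything below os
theorem runB_frame (u : List Char) (os : List (Char × Int)) (x : Int) (os' : List (Char × Int))
    (h : runB (0, os) u = some (x, os'))
    (b : Int) (d : Char × Int) (ext : List (Char × Int)) :
    runB (b, os ++ d :: ext) u = some (b, os' ++ (d.1, d.2 + x) :: ext) := by
  induction u generalizing os x d with
  | nil =>
    simp only [runB, Option.some_inj, Prod.mk.injEq] at h
    obtain ⟨hx, hos⟩ := h
    subst hos
    simp [runB, ← hx]
  | cons c cs ih =>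
    simp only [runB] at h ⊢
    cases hst : stepB (0, os) c with
    | none => rw [hst] at h; exact absurd h (by simp)
    | some st1 =>
      rw [hst] at h
      change runB st1 cs = some (x, os') at h
      rw [stepB_frame c os st1 hst b d ext]
      change runB (b, st1.2 ++ (d.1, d.2 + st1.1) :: ext) cs = _
      rw [show st1 = (st1.1, st1.2) from rfl] at h
      rw [runB_shift cs st1.1 st1.2] at h
      cases h0 : runB (0, st1.2) cs with
      | none => rw [h0] at h; simp at h
      | some r =>
        rw [h0] at h
        simp only [Option.map_some, Option.some_inj, Prod.mk.injEq] at h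
        obtain ⟨hx, hos⟩ := h
        have h0' : runB (0, st1.2) cs = some (r.1, os') := by rw [h0, ← hos]
        have hfin := ih st1.2 r.1 h0' (d.1, d.2 + st1.1)
        rw [hfin]
        have : ((d.1, d.2 + st1.1) : Char × Int).2 + r.1 = d.2 + x := by simp; omega
        rw [this]

theorem stepB_inv (c : Char) (b : Int) (os : List (Char × Int))
    (hos : ∀ e ∈ os, (e.1 = '(' ∨ e.1 = '[') ∧ 0 ≤ e.2)
    (b' : Int) (os' : List (Char × Int)) (h : stepB (b, os) c = some (b', os')) :
    (∀ e ∈ os', (e.1 = '(' ∨ e.1 = '[') ∧ 0 ≤ e.2) ∧ b ≤ b' ∧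
    (c = '(' ∨ c = ')' ∨ c = '[' ∨ c = ']') ∧
    (os'.countP (fun e => e.1 = '(') : Int)
      = (os.countP (fun e => e.1 = '(') : Int)
        + (if c = '(' then 1 else 0) - (if c = ')' then 1 else 0) ∧
    (os'.countP (fun e => e.1 = '[') : Int)
      = (os.countP (fun e => e.1 = '[') : Int)
        + (if c = '[' then 1 else 0) - (if c = ']' then 1 else 0) := by
  unfold stepB at h
  by_cases h1 : c = '(' ∨ c = '['
  · simp only [h1, if_true, Option.some_inj, Prod.mk.injEq] at h
    obtain ⟨hb, hos'⟩ := h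
    subst hb; subst hos'
    refine ⟨?_, le_refl _, by tauto, ?_, ?_⟩
    · intro e he
      rcases List.mem_cons.mp he with h | h
      · subst h; exact ⟨h1, le_refl 0⟩
      · exact hos e h
    all_goals
      rcases h1 with h1 | h1 <;> subst h1 <;>
        simp [List.countP_cons]
  · simp only [h1, if_false] at h
    by_cases h2 : c = ')' ∨ c = ']'
    · simp only [h2, if_true] at h
      match os, hos with
      | [], _ => simp at h
      | (o, v) :: os3, hos =>
        have hov : (o = '(' ∨ o = '[') ∧ 0 ≤ v := hos (o, v) (List.mem_cons_self ..)
        by_cases h3 : o = (if c = ')' then '(' else '[')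
        · simp only [h3, ne_eq, not_true_eq_false, if_false] at h
          have hadd : 2 ≤ (if c = ')' then (if v = 0 then 2 else 2 * v)
              else (if v = 0 then 3 else 3 * v) : Int) := by
            rcases hov.2.lt_or_eq with hv | hv
            · split_ifs <;> nlinarith
            · split_ifs <;> omega
          match os3 with
          | [] =>
            simp only [Option.some_inj, Prod.mk.injEq] at h
            obtain ⟨hb, hos'⟩ := h
            subst hb; subst hos'
            refine ⟨by simp, by omega, by tauto, ?_, ?_⟩ <;>
              (rcases h2 with h2 | h2 <;> subst h2 <;>
                simp_all [List.countP_cons] <;> omega)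
          | (oc, ov) :: os4 =>
            simp only [Option.some_inj, Prod.mk.injEq] at h
            obtain ⟨hb, hos'⟩ := h
            subst hb; subst hos'
            have hoc : (oc = '(' ∨ oc = '[') ∧ 0 ≤ ov :=
              hos (oc, ov) (by simp)
            refine ⟨?_, le_refl _, by tauto, ?_, ?_⟩
            · intro e he
              rcases List.mem_cons.mp he with h | h
              · subst h; exact ⟨hoc.1, by omega⟩
              · exact hos e (by simp [h])
            all_goals
              rcases h2 with h2 | h2 <;> subst h2 <;>
                simp_all [List.countP_cons] <;> omega
        · simp [h3] at h
    · simp [h2] at h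

-- combined invariant: stack entries are open brackets with nonnegative sums, the bottom
-- total only grows, all consumed characters are brackets, and the per-type bracket counts
-- balance against the stack contents
theorem runB_inv (u : List Char) (b : Int) (os : List (Char × Int))
    (hos : ∀ e ∈ os, (e.1 = '(' ∨ e.1 = '[') ∧ 0 ≤ e.2)
    (b' : Int) (os' : List (Char × Int))
    (h : runB (b, os) u = some (b', os')) :
    (∀ e ∈ os', (e.1 = '(' ∨ e.1 = '[') ∧ 0 ≤ e.2) ∧ b ≤ b' ∧
    (∀ c ∈ u, c = '(' ∨ c = ')' ∨ c = '[' ∨ c = ']') ∧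
    (os'.countP (fun e => e.1 = '(') : Int)
      = (os.countP (fun e => e.1 = '(') : Int) + (u.count '(' : Int) - (u.count ')' : Int) ∧
    (os'.countP (fun e => e.1 = '[') : Int)
      = (os.countP (fun e => e.1 = '[') : Int) + (u.count '[' : Int) - (u.count ']' : Int) := by
  induction u generalizing b os with
  | nil =>
    simp only [runB, Option.some_inj, Prod.mk.injEq] at h
    obtain ⟨hb, hos'⟩ := h
    subst hb; subst hos'
    exact ⟨hos, le_refl _, by simp, by simp, by simp⟩
  | cons c cs ih =>
    simp only [runB] at h
    cases hst : stepB (b, os) c with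
    | none => rw [hst] at h; exact absurd h (by simp)
    | some st1 =>
      rw [hst] at h
      change runB st1 cs = some (b', os') at h
      obtain ⟨hinv1, hle1, hbr1, hc1p, hc1q⟩ :=
        stepB_inv c b os hos st1.1 st1.2 (by rw [← hst])
      obtain ⟨hinv2, hle2, hbr2, hc2p, hc2q⟩ :=
        ih st1.1 st1.2 hinv1 (by rw [← h])
      refine ⟨hinv2, by omega, ?_, ?_, ?_⟩
      · intro x hx
        rcases List.mem_cons.mp hx with h | h
        · subst h; exact hbr1
        · exact hbr2 x h
      · rw [hc2p, hc1p]
        simp only [List.count_cons, beq_iff_eq]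
        push_cast
        split_ifs <;> omega
      · rw [hc2q, hc1q]
        simp only [List.count_cons, beq_iff_eq]
        push_cast
        split_ifs <;> omega

theorem stepB_mono (c : Char) (b : Int) (os : List (Char × Int))
    (hos : ∀ e ∈ os, (e.1 = '(' ∨ e.1 = '[') ∧ 0 ≤ e.2)
    (st : Int × List (Char × Int)) (h : stepB (b, os) c = some st) :
    b ≤ st.1 ∧ (st.2 = [] → b + 2 ≤ st.1) := by
  unfold stepB at h
  by_cases h1 : c = '(' ∨ c = '['
  · simp only [h1, if_true, Option.some_inj] at h
    subst h; simp
  · simp only [h1, if_false] at h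
    by_cases h2 : c = ')' ∨ c = ']'
    · simp only [h2, if_true] at h
      match os, hos with
      | [], _ => simp at h
      | (o, v) :: os3, hos =>
        have hov : (o = '(' ∨ o = '[') ∧ 0 ≤ v := hos (o, v) (List.mem_cons_self ..)
        by_cases h3 : o = (if c = ')' then '(' else '[')
        · simp only [h3, ne_eq, not_true_eq_false, if_false] at h
          have hadd : 2 ≤ (if c = ')' then (if v = 0 then 2 else 2 * v)
              else (if v = 0 then 3 else 3 * v) : Int) := by
            rcases hov.2.lt_or_eq with hv | hv
            · split_ifs <;> nlinarith
            · split_ifs <;> omega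
          match os3 with
          | [] =>
            simp only [Option.some_inj] at h
            subst h; constructor <;> simp <;> omega
          | (oc, ov) :: os4 =>
            simp only [Option.some_inj] at h
            subst h; simp
        · simp [h3] at h
    · simp [h2] at h

-- a run that starts on a nonempty stack and ends on an empty one adds at least 2 to the total
theorem runB_pop_ge_two (u : List Char) (b : Int) (os : List (Char × Int))
    (hos : ∀ e ∈ os, (e.1 = '(' ∨ e.1 = '[') ∧ 0 ≤ e.2) (hne : os ≠ [])
    (b' : Int) (h : runB (b, os) u = some (b', [])) : b + 2 ≤ b' := by
  induction u generalizing b os with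
  | nil =>
    simp only [runB, Option.some_inj, Prod.mk.injEq] at h
    exact absurd h.2 hne
  | cons c cs ih =>
    simp only [runB] at h
    cases hst : stepB (b, os) c with
    | none => rw [hst] at h; exact absurd h (by simp)
    | some st1 =>
      rw [hst] at h
      change runB st1 cs = some (b', []) at h
      have hm := stepB_mono c b os hos st1 hst
      have hinv := (stepB_inv c b os hos st1.1 st1.2 (by rw [← hst])).1
      by_cases he : st1.2 = []
      · have h2 : b + 2 ≤ st1.1 := hm.2 he
        have hmono : st1.1 ≤ b' := by
          have := (runB_inv cs st1.1 st1.2 hinv b' [] (by rw [← h])).2.1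
          omega
        omega
      · have := ih st1.1 st1.2 hinv he (by rw [← h])
        omega

theorem runB_value_ge_two (u : List Char) (hne : u ≠ []) (x : Int)
    (h : runB (0, []) u = some (x, [])) : 2 ≤ x := by
  match u, hne with
  | c :: cs, _ =>
    simp only [runB] at h
    by_cases h1 : c = '(' ∨ c = '['
    · rw [show stepB (0, []) c = some (0, [(c, 0)]) by unfold stepB; simp [h1]] at h
      change runB (0, [(c, 0)]) cs = some (x, []) at h
      have := runB_pop_ge_two cs 0 [(c, 0)]
        (by intro e he; simp at he; subst he; exact ⟨h1, le_refl 0⟩)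
        (by simp) x h
      omega
    · rw [show stepB (0, []) c = none by
        unfold stepB; by_cases h2 : c = ')' ∨ c = ']' <;> simp [h1, h2]] at h
      exact absurd h (by simp)

-- a completed self-contained run has A's two counters both zero
theorem runB_counts_zero (u : List Char) (x : Int) (h : runB (0, []) u = some (x, [])) :
    pcnt u = 0 ∧ qcnt u = 0 := by
  obtain ⟨_, _, hbr, hp, hq⟩ := runB_inv u 0 [] (by simp) x [] h
  simp only [List.countP_nil] at hp hq
  have hoth : u.countP (fun c => ¬(c = '(' ∨ c = ')' ∨ c = '[')) = u.count ']' := by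
    rw [List.count]
    apply List.countP_congr
    intro c hc
    rcases hbr c hc with h | h | h | h <;> subst h <;> rfl
  constructor
  · unfold pcnt; omega
  · unfold qcnt; rw [hoth]; omega

-- both counters zero forces the residual stack of a successful run to be empty
theorem runB_zero_stack_nil (u : List Char) (hp : pcnt u = 0) (hq : qcnt u = 0)
    (x : Int) (os : List (Char × Int)) (h : runB (0, []) u = some (x, os)) : os = [] := by
  obtain ⟨hinv, _, hbr, hcp, hcq⟩ := runB_inv u 0 [] (by simp) x os h
  simp only [List.countP_nil] at hcp hcq
  have hoth : u.countP (fun c => ¬(c = '(' ∨ c = ')' ∨ c = '[')) = u.count ']' := by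
    rw [List.count]
    apply List.countP_congr
    intro c hc
    rcases hbr c hc with h | h | h | h <;> subst h <;> rfl
  have hp0 : os.countP (fun e => e.1 = '(') = 0 := by
    unfold pcnt at hp; omega
  have hq0 : os.countP (fun e => e.1 = '[') = 0 := by
    unfold qcnt at hq; rw [hoth] at hq; omega
  have hlen : os.countP (fun e => e.1 = '(') + os.countP (fun e => e.1 = '[') = os.length := by
    clear hcp hcq hp0 hq0 h hbr hoth hp hq
    induction os with
    | nil => rfl
    | cons e os ih =>
      have h1 := hinv e (List.mem_cons_self ..)
      have ih' := ih (fun e he => hinv e (List.mem_cons_of_mem _ he))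
      simp only [List.countP_cons, List.length_cons]
      rcases h1.1 with h | h <;> simp [h] at * <;> omega
  have : os.length = 0 := by omega
  exact List.length_eq_zero_iff.mp this

def closeOf (c : Char) : Char := if c = '(' then ')' else ']'
def addB (c : Char) (v : Int) : Int :=
  if c = ')' then (if v = 0 then 2 else 2 * v) else (if v = 0 then 3 else 3 * v)
def pushInto (b : Int) (os : List (Char × Int)) (a : Int) : Int × List (Char × Int) :=
  match os with
  | [] => (b + a, [])
  | (oc, ov) :: r => (b, (oc, ov + a) :: r)

theorem stepB_open (c : Char) (hc : c = '(' ∨ c = '[') (b : Int) (os : List (Char × Int)) :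
    stepB (b, os) c = some (b, (c, 0) :: os) := by
  unfold stepB; simp [hc]

theorem stepB_pop (c : Char) (hc : c = '(' ∨ c = '[') (b w : Int) (os : List (Char × Int)) :
    stepB (b, (c, w) :: os) (closeOf c) = some (pushInto b os (addB (closeOf c) w)) := by
  rcases hc with hc | hc <;> subst hc <;>
    (unfold stepB closeOf addB pushInto; cases os <;> simp)

-- a complete bracket block 'a ++ u ++ close a' processed from the initial state
theorem runB_block (a : Char) (ha : a = '(' ∨ a = '[') (u : List Char) (x : Int)
    (hu : runB (0, []) u = some (x, [])) (rest : List Char) :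
    runB (0, []) (a :: (u ++ closeOf a :: rest))
      = runB (addB (closeOf a) x, []) rest := by
  have h1 : runB (0, []) (a :: (u ++ closeOf a :: rest))
      = runB (0, [(a, 0)]) (u ++ closeOf a :: rest) := by
    simp only [runB, stepB_open a ha 0 []]
  rw [h1, runB_append]
  have h2 : runB (0, [(a, 0)]) u = some (0, [(a, x)]) := by
    have := runB_frame u [] x [] hu 0 (a, 0) []
    simpa using this
  rw [h2]
  simp only [runB, stepB_pop a ha 0 x []]
  show runB (pushInto 0 [] (addB (closeOf a) x)) rest = _
  simp [pushInto]

-- decomposition of a successful run over a stack with (c,w) on top: either the entry is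
-- never popped, or there is a first position j where a matching close pops it
theorem runB_pop_decomp (t : List Char) (b : Int) (c : Char) (w : Int)
    (os : List (Char × Int)) (st : Int × List (Char × Int))
    (h : runB (b, (c, w) :: os) t = some st) :
    (∃ x S, runB (0, []) t = some (x, S) ∧ st = (b, S ++ (c, w + x) :: os)) ∨
    (∃ (j : Nat) (x : Int), j < t.length ∧ runB (0, []) (t.take j) = some (x, []) ∧
      t[j]? = some (closeOf c) ∧
      runB (pushInto b os (addB (closeOf c) (w + x))) (t.drop (j + 1)) = some st) := by
  suffices H : ∀ (n : Nat) (t : List Char), t.length ≤ n →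
      ∀ (b : Int) (c : Char) (w : Int) (os : List (Char × Int)) (st : Int × List (Char × Int)),
      runB (b, (c, w) :: os) t = some st →
      (∃ x S, runB (0, []) t = some (x, S) ∧ st = (b, S ++ (c, w + x) :: os)) ∨
      (∃ (j : Nat) (x : Int), j < t.length ∧ runB (0, []) (t.take j) = some (x, []) ∧
        t[j]? = some (closeOf c) ∧
        runB (pushInto b os (addB (closeOf c) (w + x))) (t.drop (j + 1)) = some st) by
    exact H t.length t le_rfl b c w os st h
  intro n
  induction n with
  | zero =>
    intro t ht b c w os st h
    have hnil : t = [] := List.length_eq_zero_iff.mp (Nat.le_zero.mp ht)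
    subst hnil
    left
    refine ⟨0, [], by simp [runB], ?_⟩
    simp only [runB, Option.some_inj] at h
    simp [← h]
  | succ n ih =>
    intro t ht b c w os st h
    match t, ht with
    | [], _ =>
      left
      refine ⟨0, [], by simp [runB], ?_⟩
      simp only [runB, Option.some_inj] at h
      simp [← h]
    | a :: t', ht =>
      have ht' : t'.length ≤ n := by simpa using ht
      by_cases ha1 : a = '(' ∨ a = '['
      · -- a pushes a new entry
        rw [show runB (b, (c,w)::os) (a::t') = runB (b, (a,0)::(c,w)::os) t' by
              simp only [runB, stepB_open a ha1]] at h
        rcases ih t' ht' b a 0 ((c,w)::os) st h with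
          ⟨x, S, hrun, hst⟩ | ⟨j, x, hj, hrun, hcj, hcont⟩
        · -- a's entry survives to the end
          left
          refine ⟨0, S ++ [(a, x)], ?_, ?_⟩
          · have hfr := runB_frame t' [] x S hrun 0 (a, 0) []
            simp only [List.nil_append] at hfr
            rw [show runB (0,[]) (a::t') = runB (0,[(a,0)]) t' by
              simp only [runB, stepB_open a ha1]]
            simpa using hfr
          · rw [hst]; simp
        · -- a's entry is closed inside t'
          have hjlen : j < t'.length := hj
          have htj : t'[j] = closeOf a := by
            have hg := List.getElem?_eq_getElem hjlen
            rw [hg] at hcj; exact Option.some_inj.mp hcj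
          have hsplit : t' = t'.take j ++ closeOf a :: t'.drop (j+1) := by
            conv_lhs => rw [← List.take_append_drop j t']
            rw [List.drop_eq_getElem_cons hjlen, htj]
          have hx0 : (0 : Int) + x = x := by omega
          rw [hx0] at hcont
          have hcont' : runB (b, (c, w + addB (closeOf a) x) :: os) (t'.drop (j+1)) = some st := by
            simpa [pushInto] using hcont
          have hlen2 : (t'.drop (j+1)).length ≤ n := by
            simp only [List.length_drop]; omega
          have hulen : (t'.take j).length = j := by
            simp only [List.length_take]; omega
          rcases ih (t'.drop (j+1)) hlen2 b c (w + addB (closeOf a) x) os st hcont' with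
            ⟨x₂, S₂, hrun₂, hst₂⟩ | ⟨j₂, x₂, hj₂, hrun₂, hcj₂, hcont₂⟩
          · left
            refine ⟨addB (closeOf a) x + x₂, S₂, ?_, ?_⟩
            · rw [show (a :: t') = a :: (t'.take j ++ closeOf a :: t'.drop (j+1)) by rw [← hsplit]]
              rw [runB_block a ha1 (t'.take j) x hrun (t'.drop (j+1))]
              rw [runB_shift, hrun₂]
              simp
            · rw [hst₂, add_assoc]
          · right
            refine ⟨j + j₂ + 2, addB (closeOf a) x + x₂, ?_, ?_, ?_, ?_⟩
            · have hd : (t'.drop (j+1)).length = t'.length - (j+1) := List.length_drop ..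
              simp only [List.length_cons]
              omega
            · have htake : (a :: t').take (j + j₂ + 2) =
                  a :: (t'.take j ++ closeOf a :: (t'.drop (j+1)).take j₂) := by
                rw [show (a :: t') = a :: (t'.take j ++ closeOf a :: t'.drop (j+1)) by rw [← hsplit]]
                simp only [List.take_succ_cons]
                rw [show j + j₂ + 1 = (t'.take j).length + (j₂ + 1) by omega]
                rw [List.take_length_add_append]
                simp
              rw [htake, runB_block a ha1 (t'.take j) x hrun ((t'.drop (j+1)).take j₂)]
              rw [runB_shift, hrun₂]
              simp
            · have heq : (a :: t') = (a :: (t'.take j ++ [closeOf a])) ++ t'.drop (j+1) := by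
                rw [show (a :: t') = a :: (t'.take j ++ closeOf a :: t'.drop (j+1)) by rw [← hsplit]]
                simp
              rw [heq]
              rw [List.getElem?_append_right (by simp [hulen] <;> omega)]
              rw [show j + j₂ + 2 - (a :: (t'.take j ++ [closeOf a])).length = j₂ by
                simp [hulen] <;> omega]
              exact hcj₂
            · have heq : (a :: t') = (a :: (t'.take j ++ [closeOf a])) ++ t'.drop (j+1) := by
                rw [show (a :: t') = a :: (t'.take j ++ closeOf a :: t'.drop (j+1)) by rw [← hsplit]]
                simp
              rw [heq]
              rw [show j + j₂ + 2 + 1 = (a :: (t'.take j ++ [closeOf a])).length + (j₂ + 1) by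
                simp [hulen] <;> omega]
              rw [List.drop_length_add_append]
              rw [show w + (addB (closeOf a) x + x₂) = w + addB (closeOf a) x + x₂ by omega]
              exact hcont₂
      · by_cases ha2 : a = ')' ∨ a = ']'
        · by_cases hm : c = (if a = ')' then '(' else '[')
          · -- a pops (c, w) immediately
            have copen : c = '(' ∨ c = '[' := by
              rcases ha2 with h2 | h2 <;> subst h2 <;> simp at hm <;> simp [hm]
            have hca : closeOf c = a := by
              rcases ha2 with h2 | h2 <;> subst h2 <;> simp at hm <;> simp [hm, closeOf]
            have hstep : stepB (b, (c,w)::os) a = some (pushInto b os (addB a w)) := by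
              rw [← hca]; exact stepB_pop c copen b w os
            rw [show runB (b, (c,w)::os) (a::t') = runB (pushInto b os (addB a w)) t' by
              simp only [runB, hstep]] at h
            right
            refine ⟨0, 0, by simp, by simp [runB], ?_, ?_⟩
            · simp [hca]
            · have : w + (0 : Int) = w := by omega
              rw [this, hca]
              simpa using h
          · exfalso
            have hnone : stepB (b, (c,w)::os) a = none := by
              unfold stepB
              simp [ha1, ha2, hm]
            simp only [runB, hnone] at h
            exact absurd h (by simp)
        · exfalso
          have hnone : stepB (b, (c,w)::os) a = none := by
            unfold stepB
            simp [ha1, ha2]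
          simp only [runB, hnone] at h
          exact absurd h (by simp)

-- split lemma: if u is a counter-balanced nonempty proper prefix then B is additive
theorem fAltL_split (u v : List Char) (hu : u ≠ []) (hv : v ≠ [])
    (hp : pcnt u = 0) (hq : qcnt u = 0) :
    fAltL (u ++ v) = if fAltL u ≠ 0 ∧ fAltL v ≠ 0 then fAltL u + fAltL v else 0 := by
  have huv : u ++ v ≠ [] := fun hc => hu (List.append_eq_nil_iff.mp hc).1
  cases h0 : runB (0, []) u with
  | none =>
    have hfu : fAltL u = 0 := by unfold fAltL; rw [if_neg hu, h0]
    have hz : fAltL (u ++ v) = 0 := by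
      unfold fAltL
      rw [if_neg huv, runB_append, h0]
    rw [hz, hfu]; simp
  | some r =>
    obtain ⟨y, os⟩ := r
    have hos : os = [] := runB_zero_stack_nil u hp hq y os h0
    subst hos
    have hy : 2 ≤ y := runB_value_ge_two u hu y h0
    have hfu : fAltL u = y := by unfold fAltL; rw [if_neg hu, h0]
    have hruv : runB (0, []) (u ++ v) = runB (y, []) v := by rw [runB_append, h0]
    cases h1 : runB (0, []) v with
    | none =>
      have hfv : fAltL v = 0 := by unfold fAltL; rw [if_neg hv, h1]
      have hz : fAltL (u ++ v) = 0 := by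
        unfold fAltL
        rw [if_neg huv, hruv, runB_shift v y [], h1]
        rfl
      rw [hz, hfv]; simp
    | some r2 =>
      obtain ⟨y2, os2⟩ := r2
      cases os2 with
      | nil =>
        have hy2 : 2 ≤ y2 := runB_value_ge_two v hv y2 h1
        have hfv : fAltL v = y2 := by unfold fAltL; rw [if_neg hv, h1]
        have hz : fAltL (u ++ v) = y + y2 := by
          unfold fAltL
          rw [if_neg huv, hruv, runB_shift v y [], h1]
          rfl
        rw [hz, hfu, hfv, if_pos ⟨by omega, by omega⟩]
      | cons e os3 =>
        have hfv : fAltL v = 0 := by unfold fAltL; rw [if_neg hv, h1]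
        have hz : fAltL (u ++ v) = 0 := by
          unfold fAltL
          rw [if_neg huv, hruv, runB_shift v y [], h1]
          rfl
        rw [hz, hfv]; simp

theorem stepB_init_none (c : Char) (hc : ¬(c = '(' ∨ c = '[')) : stepB (0, []) c = none := by
  unfold stepB
  by_cases h2 : c = ')' ∨ c = ']' <;> simp [hc, h2]

theorem fAltL_ne_zero (l : List Char) (h : fAltL l ≠ 0) :
    (l = [] ∧ fAltL l = 1) ∨ (∃ x, runB (0, []) l = some (x, []) ∧ fAltL l = x ∧ 2 ≤ x) := by
  by_cases hl : l = []
  · left; subst hl; exact ⟨rfl, by unfold fAltL; simp⟩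
  · right
    unfold fAltL at h ⊢
    rw [if_neg hl] at h ⊢
    cases h0 : runB (0, []) l with
    | none => rw [h0] at h; simp at h
    | some r =>
      obtain ⟨x, os⟩ := r
      cases os with
      | nil => exact ⟨x, rfl, rfl, runB_value_ge_two l hl x h0⟩
      | cons e os' => rw [h0] at h; simp at h

-- wrapping a counter-balanced word in a matching bracket pair keeps the counters at zero
theorem pq_sandwich (c : Char) (hc : c = '(' ∨ c = '[') (u : List Char)
    (hp : pcnt u = 0) (hq : qcnt u = 0) :
    pcnt (c :: (u ++ [closeOf c])) = 0 ∧ qcnt (c :: (u ++ [closeOf c])) = 0 := by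
  unfold pcnt qcnt at *
  rcases hc with hc | hc <;> subst hc <;>
    simp only [closeOf, if_true, if_false, List.count_cons, List.count_append,
      List.countP_cons, List.countP_append, List.count_singleton, List.countP_singleton,
      beq_iff_eq, beq_self_eq_true] <;>
    simp_all <;> omega

-- a matching wrapped block whose inside is B-valid runs to completion with the product value
theorem wrap_valid (c : Char) (hc : c = '(' ∨ c = '[') (t : List Char) (ht : t ≠ [])
    (hL : t.getLast ht = closeOf c) (hnz : fAltL t.dropLast ≠ 0) :
    runB (0, [(c, 0)]) t = some ((if c = '(' then 2 else 3) * fAltL t.dropLast, []) := by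
  have hdec : t.dropLast ++ [closeOf c] = t := by
    rw [← hL]; exact List.dropLast_append_getLast ht
  rcases fAltL_ne_zero t.dropLast hnz with ⟨hI, hv⟩ | ⟨x, hrun, hvx, hx2⟩
  · have ht1 : t = [closeOf c] := by rw [← hdec, hI]; rfl
    rw [ht1]
    have h1 : fAltL ([closeOf c] : List Char).dropLast = 1 := by simp [fAltL]
    rw [h1]
    rw [show runB (0, [(c,0)]) [closeOf c]
        = runB (pushInto 0 [] (addB (closeOf c) 0)) [] by
      simp only [runB, stepB_pop c hc 0 0 []]]
    rcases hc with hc | hc <;> subst hc <;> simp [runB, pushInto, addB, closeOf]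
  · rw [← hdec, runB_append]
    have hfr := runB_frame t.dropLast [] x [] hrun 0 (c, 0) []
    simp only [List.nil_append, List.append_nil] at hfr
    rw [hfr]
    show runB (0, [(c, 0 + x)]) [closeOf c]
        = some ((if c = '(' then 2 else 3) * fAltL (t.dropLast ++ [closeOf c]).dropLast, [])
    rw [show runB (0, [(c, 0 + x)]) [closeOf c]
        = runB (pushInto 0 [] (addB (closeOf c) (0 + x))) [] by
      simp only [runB, stepB_pop c hc 0 (0 + x) []]]
    rw [show (t.dropLast ++ [closeOf c]).dropLast = t.dropLast by simp]
    rw [hvx]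
    have hxz : ¬ (0 + x = 0) := by omega
    rcases hc with hc | hc <;> subst hc <;>
      simp [runB, pushInto, addB, closeOf, hxz] <;> omega

-- with no interior balanced split point, an interior match of the head bracket can only be the last character
theorem wrap_last (c : Char) (hc : c = '(' ∨ c = '[') (t : List Char)
    (H : ∀ j : Nat, 1 ≤ j → j ≤ t.length →
      ¬(pcnt ((c :: t).take j) = 0 ∧ qcnt ((c :: t).take j) = 0))
    (j : Nat) (x : Int) (hj : j < t.length)
    (hrun : runB (0, []) (t.take j) = some (x, []))
    (hcj : t[j]? = some (closeOf c)) : j = t.length - 1 := by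
  by_contra hne
  have hjlt : j < t.length - 1 := by omega
  obtain ⟨hp, hq⟩ := runB_counts_zero (t.take j) x hrun
  obtain ⟨hp2, hq2⟩ := pq_sandwich c hc (t.take j) hp hq
  have htake : (c :: t).take (j + 2) = c :: (t.take j ++ [closeOf c]) := by
    rw [show j + 2 = (j + 1) + 1 from rfl, List.take_succ_cons]
    congr 1
    rw [List.take_succ, hcj]
    rfl
  exact H (j + 2) (by omega) (by omega) (by rw [htake]; exact ⟨hp2, hq2⟩)

-- wrapper lemma: with no balanced split point, B behaves as peel-outer-bracket
theorem fAltL_wrap (c : Char) (t : List Char)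
    (H : ∀ j : Nat, 1 ≤ j → j ≤ t.length → ¬(pcnt ((c :: t).take j) = 0 ∧ qcnt ((c :: t).take j) = 0)) :
    fAltL (c :: t) =
      if c = '(' ∧ (c :: t).getLast? = some ')' then 2 * fAltL t.dropLast
      else if c = '[' ∧ (c :: t).getLast? = some ']' then 3 * fAltL t.dropLast
      else 0 := by
  by_cases hc : c = '(' ∨ c = '['
  · by_cases hte : t = []
    · subst hte
      have hval : fAltL [c] = 0 := by
        unfold fAltL
        rw [if_neg (List.cons_ne_nil c [])]
        rw [show runB (0, []) [c] = some (0, [(c, 0)]) by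
          simp only [runB, stepB_open c hc]]
      rw [hval]
      split_ifs with h1 h2
      · exfalso
        obtain ⟨hc1, hg⟩ := h1
        simp only [List.getLast?_singleton, Option.some_inj] at hg
        subst hc1; exact absurd hg (by decide)
      · exfalso
        obtain ⟨hc1, hg⟩ := h2
        simp only [List.getLast?_singleton, Option.some_inj] at hg
        subst hc1; exact absurd hg (by decide)
      · rfl
    · have hgl : (c :: t).getLast? = some (t.getLast hte) := by
        rw [List.getLast?_eq_some_getLast (List.cons_ne_nil c t)]
        congr 1
        exact List.getLast_cons hte
      by_cases hLc : t.getLast hte = closeOf c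
      · by_cases hnz : fAltL t.dropLast = 0
        · have hval : fAltL (c :: t) = 0 := by
            unfold fAltL
            rw [if_neg (List.cons_ne_nil c t)]
            rw [show runB (0, []) (c :: t) = runB (0, [(c, 0)]) t by
              simp only [runB, stepB_open c hc]]
            cases hbig : runB (0, [(c, 0)]) t with
            | none => rfl
            | some st =>
              rcases runB_pop_decomp t 0 c 0 [] st hbig with
                ⟨x, S, hrun, hst⟩ | ⟨j, x, hj, hrun, hcj, hcont⟩
              · subst hst; cases S <;> rfl
              · exfalso
                have hjl := wrap_last c hc t H j x hj hrun hcj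
                have hIdl : t.take j = t.dropLast := by
                  rw [List.dropLast_eq_take, hjl]
                by_cases hI : t.take j = []
                · rw [← hIdl, hI] at hnz
                  simp [fAltL] at hnz
                · have hfx : fAltL (t.take j) = x := by
                    unfold fAltL; rw [if_neg hI, hrun]
                  have hx2 := runB_value_ge_two (t.take j) hI x hrun
                  rw [hIdl] at hfx
                  omega
          rw [hval]
          split_ifs <;> simp [hnz]
        · have hv := wrap_valid c hc t hte hLc hnz
          have hval : fAltL (c :: t) = (if c = '(' then 2 else 3) * fAltL t.dropLast := by
            unfold fAltL
            rw [if_neg (List.cons_ne_nil c t)]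
            rw [show runB (0, []) (c :: t) = runB (0, [(c, 0)]) t by
              simp only [runB, stepB_open c hc]]
            rw [hv]
            rfl
          rw [hval]
          rcases hc with hc1 | hc1 <;> subst hc1 <;> simp [hgl, hLc, closeOf]
      · have hval : fAltL (c :: t) = 0 := by
          unfold fAltL
          rw [if_neg (List.cons_ne_nil c t)]
          rw [show runB (0, []) (c :: t) = runB (0, [(c, 0)]) t by
            simp only [runB, stepB_open c hc]]
          cases hbig : runB (0, [(c, 0)]) t with
          | none => rfl
          | some st =>
            rcases runB_pop_decomp t 0 c 0 [] st hbig with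
              ⟨x, S, hrun, hst⟩ | ⟨j, x, hj, hrun, hcj, hcont⟩
            · subst hst; cases S <;> rfl
            · exfalso
              have hjl := wrap_last c hc t H j x hj hrun hcj
              have hg2 : t[j] = closeOf c := by
                have hge := List.getElem?_eq_getElem hj
                rw [hge] at hcj; exact Option.some_inj.mp hcj
              apply hLc
              subst hjl
              rw [List.getLast_eq_getElem]
              exact hg2
        rw [hval]
        split_ifs with h1 h2
        · exfalso
          apply hLc
          obtain ⟨hc1, hg⟩ := h1
          rw [hgl, Option.some_inj] at hg
          rw [hg, hc1]; rfl
        · exfalso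
          apply hLc
          obtain ⟨hc1, hg⟩ := h2
          rw [hgl, Option.some_inj] at hg
          rw [hg, hc1]; rfl
        · rfl
  · have hval : fAltL (c :: t) = 0 := by
      unfold fAltL
      rw [if_neg (List.cons_ne_nil c t)]
      rw [show runB (0, []) (c :: t) = none by
        simp only [runB, stepB_init_none c hc]]
    rw [hval]
    split_ifs with h1 h2
    · exact absurd (Or.inl h1.1) hc
    · exact absurd (Or.inr h2.1) hc
    · rfl

theorem pcnt_take_succ (s : List Char) (i : Nat) (h : i < s.length) :
    pcnt (s.take (i+1)) = pcnt (s.take i) +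
      (if s.getD i ' ' = '(' then 1 else if s.getD i ' ' = ')' then -1 else 0) := by
  rw [List.take_succ, List.getElem?_eq_getElem h,
      List.getD_eq_getElem s ' ' h]
  unfold pcnt
  simp only [Option.toList_some, List.count_append, List.count_cons, List.count_nil,
    beq_iff_eq]
  split_ifs <;> simp_all <;> omega

theorem qcnt_take_succ (s : List Char) (i : Nat) (h : i < s.length) :
    qcnt (s.take (i+1)) = qcnt (s.take i) +
      (if s.getD i ' ' = '(' then 0 else if s.getD i ' ' = ')' then 0
       else if s.getD i ' ' = '[' then 1 else -1) := by
  rw [List.take_succ, List.getElem?_eq_getElem h,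
      List.getD_eq_getElem s ' ' h]
  unfold qcnt
  simp only [Option.toList_some, List.count_append, List.count_cons, List.count_nil,
    List.countP_append, List.countP_cons, List.countP_nil, beq_iff_eq]
  split_ifs <;> simp_all <;> omega

-- the loop of A, run from a faithful counter state with no balanced split point so far,
-- computes B's value
theorem loopA_eq (n : Nat) (ih : ∀ u : List Char, u.length ≤ n → fA u = fAltL u)
    (s : List Char) (hs : s.length ≤ n + 1) (hnil : s ≠ []) :
    ∀ (k i : Nat) (p q : Int), i + k = s.length - 1 →
      p = pcnt (s.take i) → q = qcnt (s.take i) →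
      (∀ j : Nat, 1 ≤ j → j ≤ i → ¬(pcnt (s.take j) = 0 ∧ qcnt (s.take j) = 0)) →
      loopA s i p q = fAltL s := by
  intro k
  induction k with
  | zero =>
    intro i p q hik hp hq hH
    rw [loopA, dif_neg (by omega)]
    cases s with
    | nil => exact absurd rfl hnil
    | cons c rest =>
      show (if c = '(' ∧ (c :: rest).getLast? = some ')' then 2 * fA rest.dropLast
            else if c = '[' ∧ (c :: rest).getLast? = some ']' then 3 * fA rest.dropLast
            else 0) = fAltL (c :: rest)
      rw [ih rest.dropLast (by simp only [List.length_dropLast]; simp at hs; omega)]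
      refine (fAltL_wrap c rest ?_).symm
      intro j h1 h2
      apply hH j h1
      simp at hik
      omega
  | succ k ihk =>
    intro i p q hik hp hq hH
    have hilt : i < s.length - 1 := by omega
    have hie : i < s.length := by omega
    rw [loopA, dif_pos hilt]
    show (if (if s.getD i ' ' = '(' then p + 1 else if s.getD i ' ' = ')' then p - 1 else p) = 0 ∧
             (if s.getD i ' ' = '(' then q else if s.getD i ' ' = ')' then q
              else if s.getD i ' ' = '[' then q + 1 else q - 1) = 0 then
           (if fA (s.take (i+1)) ≠ 0 ∧ fA (s.drop (i+1)) ≠ 0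
            then fA (s.take (i+1)) + fA (s.drop (i+1)) else 0)
         else loopA s (i+1)
           (if s.getD i ' ' = '(' then p + 1 else if s.getD i ' ' = ')' then p - 1 else p)
           (if s.getD i ' ' = '(' then q else if s.getD i ' ' = ')' then q
            else if s.getD i ' ' = '[' then q + 1 else q - 1)) = fAltL s
    set P : Int := (if s.getD i ' ' = '(' then p + 1 else if s.getD i ' ' = ')' then p - 1 else p)
      with hPdef
    set Q : Int := (if s.getD i ' ' = '(' then q else if s.getD i ' ' = ')' then q
            else if s.getD i ' ' = '[' then q + 1 else q - 1) with hQdef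
    have hP : P = pcnt (s.take (i+1)) := by
      rw [hPdef, hp, pcnt_take_succ s i hie]
      split_ifs <;> omega
    have hQ : Q = qcnt (s.take (i+1)) := by
      rw [hQdef, hq, qcnt_take_succ s i hie]
      split_ifs <;> omega
    by_cases hz : P = 0 ∧ Q = 0
    · rw [if_pos hz]
      have hu : s.take (i+1) ≠ [] :=
        List.ne_nil_of_length_pos (by simp only [List.length_take]; omega)
      have hv : s.drop (i+1) ≠ [] :=
        List.ne_nil_of_length_pos (by simp only [List.length_drop]; omega)
      rw [ih (s.take (i+1)) (by simp only [List.length_take]; omega),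
          ih (s.drop (i+1)) (by simp only [List.length_drop]; omega)]
      have hsplit := fAltL_split (s.take (i+1)) (s.drop (i+1)) hu hv
        (by rw [← hP]; exact hz.1) (by rw [← hQ]; exact hz.2)
      rw [List.take_append_drop] at hsplit
      rw [hsplit]
    · rw [if_neg hz]
      apply ihk (i+1) P Q (by omega) hP hQ
      intro j h1 h2
      rcases Nat.lt_or_ge j (i+1) with hj | hj
      · exact hH j h1 (by omega)
      · have : j = i + 1 := by omega
        subst this
        rw [← hP, ← hQ]
        exact hz

theorem fA_eq_fAltL (s : List Char) : fA s = fAltL s := by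
  suffices H : ∀ (n : Nat) (s : List Char), s.length ≤ n → fA s = fAltL s from
    H s.length s le_rfl
  intro n
  induction n with
  | zero =>
    intro s hs
    have hnil : s = [] := List.length_eq_zero_iff.mp (Nat.le_zero.mp hs)
    subst hnil
    rw [fA]
    simp [fAltL]
  | succ n ihn =>
    intro s hs
    by_cases hnil : s = []
    · subst hnil; rw [fA]; simp [fAltL]
    · rw [fA, if_neg hnil]
      exact loopA_eq n ihn s hs hnil (s.length - 1) 0 0 0 (by omega)
        (by simp [pcnt]) (by simp [qcnt]) (by intro j h1 h2; omega)

-- ===== VERDICT (by name: the statement is the Claim_ definition above) =====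
theorem f_spec : Claim_equal_f := by
  intro s _
  show f s = f_alt s
  exact fA_eq_fAltL s.toList
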